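-- pv_equiv track=rewrite | github.com/Mashi007/pagos | backend/app/services/reporte_clientes_hoja.py | _pick_mes_header
-- ===== SOURCE A (Python) =====
-- from typing import Any, List, Optional, Set, Tuple
--
-- def _pick_mes_header(headers: List[str]) -> Optional[str]:
--     for h in headers:
--         hl = (h or "").strip().casefold()
--         if hl == "mes":
--             return h
--     for h in headers:
--         hl = (h or "").strip().casefold()
--         if hl.startswith("mes") and len(hl) <= 6:
--             return h
--     return None
-- ===== SOURCE B (Python) =====
-- from typing import List, Optional
--
-- def _pick_mes_header(headers: List[str]) -> Optional[str]:
--     candidate = None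
--     for h in headers:
--         hl = (h or "").strip().casefold()
--         if hl == "mes":
--             return h
--         if candidate is None and hl.startswith("mes") and len(hl) <= 6:
--             candidate = h
--     return candidate
-- ===== Notes on version B (the rewrite author's own statement) =====
-- stated objective: alternative
-- what changed: Merges A's two scans into a single pass that returns an exact 'mes' match immediately and remembers the first prefix candidate otherwise.
import Mathlib
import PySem

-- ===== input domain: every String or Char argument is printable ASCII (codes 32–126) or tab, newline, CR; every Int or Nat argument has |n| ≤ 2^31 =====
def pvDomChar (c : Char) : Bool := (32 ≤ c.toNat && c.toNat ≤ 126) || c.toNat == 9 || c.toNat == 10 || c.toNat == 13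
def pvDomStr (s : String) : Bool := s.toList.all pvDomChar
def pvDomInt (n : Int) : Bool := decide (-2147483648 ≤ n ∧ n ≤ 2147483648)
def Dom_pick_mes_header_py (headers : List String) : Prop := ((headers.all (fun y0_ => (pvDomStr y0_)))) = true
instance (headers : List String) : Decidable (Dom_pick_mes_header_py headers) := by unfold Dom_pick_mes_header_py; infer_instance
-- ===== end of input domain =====

-- B merges A's two scans into one pass: immediate return on exact match, first prefix match kept as candidate (objective: alternative single-pass decomposition).
-- Python's casefold is ported as PySem.Str.lower, exact on the ASCII domain Dom_. '(h or "")' is the identity on strings (falsy str is "").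

-- ===== PORT A =====
-- first loop of A: return first h whose normalized form equals "mes"
def pickExact : List String → Option String
  | [] => none
  | h :: t =>
    let hl := PySem.Str.lower (PySem.Str.strip h)
    if hl = "mes" then some h else pickExact t

-- second loop of A: return first h whose normalized form starts with "mes" and has length ≤ 6
def pickPrefix : List String → Option String
  | [] => none
  | h :: t =>
    let hl := PySem.Str.lower (PySem.Str.strip h)
    if PySem.Str.startswith hl "mes" = true ∧ PySem.Str.len hl ≤ 6 then some h else pickPrefix t

def pick_mes_header_py (headers : List String) : Option String :=
  match pickExact headers with
  | some h => some h
  | none => pickPrefix headers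

-- ===== PORT B =====
-- single loop carrying the first prefix candidate
def pickLoop : List String → Option String → Option String
  | [], cand => cand
  | h :: t, cand =>
    let hl := PySem.Str.lower (PySem.Str.strip h)
    if hl = "mes" then some h
    else if cand = none ∧ PySem.Str.startswith hl "mes" = true ∧ PySem.Str.len hl ≤ 6 then
      pickLoop t (some h)
    else pickLoop t cand

def pick_mes_header_py_alt (headers : List String) : Option String :=
  pickLoop headers none

-- ===== PRECONDITION & SPEC =====
def Spec_pick_mes_header_py (headers : List String) (out : Option String) : Prop := out = pick_mes_header_py_alt headers
instance (headers : List String) (out : Option String) : Decidable (Spec_pick_mes_header_py headers out) := by unfold Spec_pick_mes_header_py; infer_instance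

-- ===== CLAIM (what is proved, stated in full; the proofs are below) =====
def Claim_equal_pick_mes_header_py : Prop := ∀ (headers : List String), Dom_pick_mes_header_py headers → Spec_pick_mes_header_py headers (pick_mes_header_py headers)

-- ===== LEMMAS AND PROOFS =====
-- loop invariant: the one-pass loop with candidate 'cand' computes
-- "first exact match, else the stored candidate, else the first prefix match"
theorem pickLoop_eq (t : List String) : ∀ (cand : Option String),
    pickLoop t cand =
      match pickExact t with
      | some h => some h
      | none => match cand with
        | some c => some c
        | none => pickPrefix t := by
  induction t with
  | nil => intro cand; cases cand <;> simp [pickLoop, pickExact, pickPrefix]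
  | cons h t ih =>
    intro cand
    simp only [pickLoop, pickExact, pickPrefix]
    by_cases h1 : PySem.Str.lower (PySem.Str.strip h) = "mes"
    · simp [h1]
    · rw [if_neg h1, if_neg h1]
      by_cases hp : PySem.Str.startswith (PySem.Str.lower (PySem.Str.strip h)) "mes" = true ∧
          PySem.Str.len (PySem.Str.lower (PySem.Str.strip h)) ≤ 6
      · cases cand with
        | none =>
          rw [if_pos ⟨rfl, hp⟩, if_pos hp, ih (some h)]
        | some c =>
          rw [if_neg (by simp), ih (some c)]
      · rw [if_neg (fun hh => hp hh.2), if_neg hp, ih cand]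

-- ===== VERDICT (by name: the statement is the Claim_ definition above) =====
theorem pick_mes_header_py_spec : Claim_equal_pick_mes_header_py := by
  intro headers _
  unfold Spec_pick_mes_header_py pick_mes_header_py pick_mes_header_py_alt
  rw [pickLoop_eq]
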